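-- pv_equiv track=rewrite | github.com/kanggihoo/musinsa-crawling | crawler/preprocess.py | find_content_regions
-- ===== SOURCE A (Python) =====
-- def find_content_regions(white_rows):
--     """컨텐츠(비흰색) 영역의 시작점과 끝점을 찾는 함수"""
--     height = len(white_rows)
--     content_regions = []
--
--     i = 0
--     while i < height:
--         # 컨텐츠 영역 시작점 찾기
--         if not white_rows[i]:
--             start = i
--             # 컨텐츠 영역 끝점 찾기
--             while i < height and not white_rows[i]:
--                 i += 1
--             end = i - 1
--             content_regions.append((start, end))
--         else:
--             i += 1
--
--     return content_regions
-- ===== SOURCE B (Python) =====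
-- def find_content_regions(white_rows):
--     """Single forward pass with an Option-like 'start' state instead of nested while loops."""
--     regions = []
--     start = None
--     i = 0
--     for w in white_rows:
--         if w:
--             if start is not None:
--                 regions.append((start, i - 1))
--                 start = None
--         elif start is None:
--             start = i
--         i += 1
--     if start is not None:
--         regions.append((start, len(white_rows) - 1))
--     return regions
-- ===== Notes on version B (the rewrite author's own statement) =====
-- stated objective: simpler
-- what changed: Replaced A's nested while loops with index re-checking by a single for-loop fold that carries an optional run-start and flushes a region when a white row (or the end) is reached.
import Mathlib
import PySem

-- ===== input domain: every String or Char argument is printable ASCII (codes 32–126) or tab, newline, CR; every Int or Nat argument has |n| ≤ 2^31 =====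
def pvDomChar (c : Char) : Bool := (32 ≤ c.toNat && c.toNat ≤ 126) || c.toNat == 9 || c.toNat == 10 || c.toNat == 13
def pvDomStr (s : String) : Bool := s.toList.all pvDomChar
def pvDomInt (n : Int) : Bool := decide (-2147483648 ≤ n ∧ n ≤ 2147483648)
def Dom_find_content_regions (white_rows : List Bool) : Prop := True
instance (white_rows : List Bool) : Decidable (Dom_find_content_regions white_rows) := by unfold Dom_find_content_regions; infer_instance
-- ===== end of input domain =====

-- B replaces A's nested while-loops (inner run-consuming scan) by a single fold carrying an optional run start; same O(n), simpler.

-- ===== PORT A =====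
-- inner while loop of A: 'while i < height and not white_rows[i]: i += 1'
-- (the remaining suffix stands for white_rows[i:]; the Int is A's index i)
def find_content_regions_run : List Bool → Int → Int × List Bool
  | [], i => (i, [])
  | w :: ws, i => if w = false then find_content_regions_run ws (i + 1) else (i, w :: ws)

theorem find_content_regions_run_len (l : List Bool) (i : Int) :
    (find_content_regions_run l i).2.length ≤ l.length := by
  induction l generalizing i with
  | nil => simp [find_content_regions_run]
  | cons w ws ih =>
    simp only [find_content_regions_run]
    split
    · exact le_trans (ih _) (by simp)
    · simp

-- outer while loop of A
def find_content_regions_go : List Bool → Int → List (Int × Int) → List (Int × Int)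
  | [], _, acc => acc
  | w :: ws, i, acc =>
    if h : w = false then
      let start := i
      let p := find_content_regions_run (w :: ws) i
      find_content_regions_go p.2 p.1 (acc ++ [(start, p.1 - 1)])
    else
      find_content_regions_go ws (i + 1) acc
termination_by l => l.length
decreasing_by
  · simp only [find_content_regions_run, if_pos h]
    exact Nat.lt_succ_of_le (find_content_regions_run_len ws (i + 1))
  · simp

def find_content_regions (white_rows : List Bool) : List (Int × Int) :=
  find_content_regions_go white_rows 0 []

-- ===== PORT B =====
-- loop body of B's single for-loop; state = (regions, start, i)
def find_content_regions_step (st : List (Int × Int) × Option Int × Int) (w : Bool) :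
    List (Int × Int) × Option Int × Int :=
  let (regions, start, i) := st
  if w then
    match start with
    | some s => (regions ++ [(s, i - 1)], none, i + 1)
    | none => (regions, none, i + 1)
  else
    match start with
    | none => (regions, some i, i + 1)
    | some s => (regions, some s, i + 1)

def find_content_regions_alt (white_rows : List Bool) : List (Int × Int) :=
  let st := white_rows.foldl find_content_regions_step ([], none, 0)
  match st.2.1 with
  | some s => st.1 ++ [(s, (white_rows.length : Int) - 1)]
  | none => st.1

-- ===== PRECONDITION & SPEC =====
def Spec_find_content_regions (white_rows : List Bool) (out : List (Int × Int)) : Prop := out = find_content_regions_alt white_rows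
instance (white_rows : List Bool) (out : List (Int × Int)) : Decidable (Spec_find_content_regions white_rows out) := by unfold Spec_find_content_regions; infer_instance

-- ===== CLAIM (what is proved, stated in full; the proofs are below) =====
def Claim_equal_find_content_regions : Prop := ∀ (white_rows : List Bool), Dom_find_content_regions white_rows → Spec_find_content_regions white_rows (find_content_regions white_rows)

-- ===== LEMMAS AND PROOFS =====

-- reference function both ports are reduced to
def fcrSpec : List Bool → Int → Option Int → List (Int × Int)
  | [], i, none => []
  | [], i, some s => [(s, i - 1)]
  | w :: ws, i, none => if w then fcrSpec ws (i + 1) none else fcrSpec ws (i + 1) (some i)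
  | w :: ws, i, some s => if w then (s, i - 1) :: fcrSpec ws (i + 1) none else fcrSpec ws (i + 1) (some s)

theorem fcrSpec_run (l : List Bool) (k : Int) (s : Int) :
    fcrSpec l k (some s) =
      (s, (find_content_regions_run l k).1 - 1) ::
        fcrSpec (find_content_regions_run l k).2 (find_content_regions_run l k).1 none := by
  induction l generalizing k with
  | nil => simp [fcrSpec, find_content_regions_run]
  | cons w ws ih =>
    cases w with
    | false => simpa [fcrSpec, find_content_regions_run] using ih (k + 1)
    | true => simp [fcrSpec, find_content_regions_run]

theorem fcr_go_spec (l : List Bool) (i : Int) (acc : List (Int × Int)) :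
    find_content_regions_go l i acc = acc ++ fcrSpec l i none := by
  induction hn : l.length using Nat.strong_induction_on generalizing l i acc with
  | _ n ih =>
    cases l with
    | nil => simp [find_content_regions_go, fcrSpec]
    | cons w ws =>
      cases w with
      | true =>
        rw [find_content_regions_go, dif_neg (by simp)]
        have hfs : fcrSpec (true :: ws) i none = fcrSpec ws (i + 1) none := by
          simp [fcrSpec]
        rw [hfs]
        have hlen : ws.length < n := by simp at hn; omega
        exact ih ws.length hlen ws _ acc rfl
      | false =>
        rw [find_content_regions_go]
        simp only [reduceDIte]
        have hrun : find_content_regions_run (false :: ws) i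
            = find_content_regions_run ws (i + 1) := by
          simp [find_content_regions_run]
        have hlen : (find_content_regions_run ws (i + 1)).2.length < n := by
          have := find_content_regions_run_len ws (i + 1)
          simp at hn; omega
        rw [hrun, ih _ hlen _ _ _ rfl]
        have : fcrSpec (false :: ws) i none = fcrSpec ws (i + 1) (some i) := by
          simp [fcrSpec]
        rw [this, fcrSpec_run ws (i + 1) i]
        simp

theorem fcr_fold_spec (l : List Bool) (regions : List (Int × Int)) (start : Option Int) (i : Int) :
    (match (l.foldl find_content_regions_step (regions, start, i)).2.1 with
      | some s => (l.foldl find_content_regions_step (regions, start, i)).1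
          ++ [(s, (l.foldl find_content_regions_step (regions, start, i)).2.2 - 1)]
      | none => (l.foldl find_content_regions_step (regions, start, i)).1)
      = regions ++ fcrSpec l i start := by
  induction l generalizing regions start i with
  | nil => cases start <;> simp [fcrSpec]
  | cons w ws ih =>
    cases w <;> cases start <;>
      simp only [List.foldl_cons, find_content_regions_step, fcrSpec] <;>
      simp [ih]

theorem fcr_fold_idx (l : List Bool) (regions : List (Int × Int)) (start : Option Int) (i : Int) :
    (l.foldl find_content_regions_step (regions, start, i)).2.2 = i + l.length := by
  induction l generalizing regions start i with
  | nil => simp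
  | cons w ws ih =>
    cases w <;> cases start <;>
      simp only [List.foldl_cons, find_content_regions_step] <;>
      simp [ih] <;> omega

theorem fcr_alt_spec (l : List Bool) : find_content_regions_alt l = fcrSpec l 0 none := by
  unfold find_content_regions_alt
  have h := fcr_fold_spec l [] none 0
  have hi := fcr_fold_idx l [] none 0
  simp only [hi, zero_add] at h
  simpa using h

-- ===== VERDICT (by name: the statement is the Claim_ definition above) =====
theorem find_content_regions_spec : Claim_equal_find_content_regions := by
  intro l _
  unfold Spec_find_content_regions
  rw [fcr_alt_spec, find_content_regions, fcr_go_spec]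
  simp
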